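-- pv_equiv track=rewrite | github.com/yamixdev/zefir | src/bot/handlers/games.py | _next_player_id
-- ===== SOURCE A (Python) =====
-- def _next_player_id(session: dict, user_id: int) -> int | None:
--     players = session.get("players") or []
--     ids = [p["user_id"] for p in players]
--     if not ids:
--         return None
--     if user_id not in ids:
--         return ids[0]
--     return ids[(ids.index(user_id) + 1) % len(ids)]
-- ===== SOURCE B (Python) =====
-- def _next_player_id(session: dict, user_id: int) -> int | None:
--     players = session.get("players") or []
--     if not players:
--         return None
--     first = players[0]["user_id"]
--     found = False
--     for p in players:
--         uid = p["user_id"]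
--         if found:
--             return uid
--         if uid == user_id:
--             found = True
--     return first
-- ===== Notes on version B (the rewrite author's own statement) =====
-- stated objective: simpler
-- what changed: Replaced the materialised ids list, the membership test, list.index and the modulo arithmetic by a single flag-carrying scan over players that returns the element after the first match and falls back to the first id on wrap-around or no match.
import Mathlib
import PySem

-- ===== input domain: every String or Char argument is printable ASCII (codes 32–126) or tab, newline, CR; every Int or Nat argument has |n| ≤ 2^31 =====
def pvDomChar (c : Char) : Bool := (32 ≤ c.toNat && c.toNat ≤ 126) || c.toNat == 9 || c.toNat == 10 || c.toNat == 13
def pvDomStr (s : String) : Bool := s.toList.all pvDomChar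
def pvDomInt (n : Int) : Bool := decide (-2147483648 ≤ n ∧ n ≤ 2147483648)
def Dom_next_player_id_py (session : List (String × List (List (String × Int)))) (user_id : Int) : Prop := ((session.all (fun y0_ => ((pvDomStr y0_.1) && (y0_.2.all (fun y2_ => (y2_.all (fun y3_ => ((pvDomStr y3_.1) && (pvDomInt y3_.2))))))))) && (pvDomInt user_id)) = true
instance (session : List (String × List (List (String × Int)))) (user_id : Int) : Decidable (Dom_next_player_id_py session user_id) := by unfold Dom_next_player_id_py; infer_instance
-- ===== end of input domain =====

-- B replaces A's three passes (build ids, membership test, .index + modulo) by one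
-- flag-carrying scan over players; same return value, no speed claim (objective: simpler).

-- ===== PORT A =====
-- p["user_id"] is total here via getD 0; Pre_ excludes the KeyError inputs, so the
-- default is never reached on admitted inputs.
def next_player_id_py (session : List (String × List (List (String × Int)))) (user_id : Int) : Option Int :=
  let players := ((PySem.Dict.mk session).get? "players").getD []
  let ids := players.map (fun p => ((PySem.Dict.mk p).get? "user_id").getD 0)
  if ids = [] then none
  else if ¬ ids.contains user_id then some (PySem.List.pyGetD ids 0 0)
  else
    match PySem.List.index? ids user_id with
    | some i => some (PySem.List.pyGetD ids (PySem.Int.mod ((i : Int) + 1) (ids.length : Int)) 0)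
    | none => none  -- unreachable: guarded by the membership test above

-- ===== PORT B =====
def pvAltLoop (user_id first : Int) : List (List (String × Int)) → Bool → Int
  | [], _ => first
  | p :: rest, found =>
      let uid := ((PySem.Dict.mk p).get? "user_id").getD 0
      if found then uid
      else pvAltLoop user_id first rest (uid == user_id)

def next_player_id_py_alt (session : List (String × List (List (String × Int)))) (user_id : Int) : Option Int :=
  let players := ((PySem.Dict.mk session).get? "players").getD []
  match players with
  | [] => none
  | p0 :: _ => some (pvAltLoop user_id (((PySem.Dict.mk p0).get? "user_id").getD 0) players false)

-- ===== PRECONDITION & SPEC =====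
-- Pre_ excludes exactly the inputs where some player dict lacks the key "user_id":
-- there Python A raises KeyError (and so does B).
def Pre_next_player_id_py (session : List (String × List (List (String × Int)))) (user_id : Int) : Prop :=
  ∀ p ∈ ((PySem.Dict.mk session).get? "players").getD [], ((PySem.Dict.mk p).get? "user_id").isSome = true
instance (session : List (String × List (List (String × Int)))) (user_id : Int) : Decidable (Pre_next_player_id_py session user_id) := by unfold Pre_next_player_id_py; infer_instance
def pvWitness_next_player_id_py : (List (String × List (List (String × Int)))) × Int :=
  ([("players", [[("user_id", 1)], [("user_id", 2)]])], 1)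

def Spec_next_player_id_py (session : List (String × List (List (String × Int)))) (user_id : Int) (out : Option Int) : Prop := out = next_player_id_py_alt session user_id
instance (session : List (String × List (List (String × Int)))) (user_id : Int) (out : Option Int) : Decidable (Spec_next_player_id_py session user_id out) := by unfold Spec_next_player_id_py; infer_instance

-- ===== CLAIM (what is proved, stated in full; the proofs are below) =====
def Claim_equal_next_player_id_py : Prop := ∀ (session : List (String × List (List (String × Int)))) (user_id : Int), Dom_next_player_id_py session user_id → Pre_next_player_id_py session user_id → Spec_next_player_id_py session user_id (next_player_id_py session user_id)

-- ===== LEMMAS AND PROOFS =====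

-- After the flag is set, the loop returns the next uid, or `first` if none remains.
theorem pvAltLoop_true (u first : Int) (ps : List (List (String × Int))) :
    pvAltLoop u first ps true =
      (ps.map (fun p => ((PySem.Dict.mk p).get? "user_id").getD 0)).headD first := by
  cases ps <;> simp [pvAltLoop]

-- Flag-false loop characterised by the first-occurrence index in the mapped ids.
theorem pvAltLoop_false (u first : Int) (ps : List (List (String × Int))) :
    pvAltLoop u first ps false =
      match PySem.List.index? (ps.map (fun p => ((PySem.Dict.mk p).get? "user_id").getD 0)) u with
      | none => first
      | some i => ((ps.map (fun p => ((PySem.Dict.mk p).get? "user_id").getD 0)).drop (i + 1)).headD first := by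
  induction ps with
  | nil => simp [pvAltLoop, PySem.List.index?]
  | cons p rest ih =>
    by_cases h : ((PySem.Dict.mk p).get? "user_id").getD 0 = u
    · simp only [pvAltLoop, h, List.map_cons]
      rw [PySem.List.index?_cons_self]
      simp [pvAltLoop_true]
    · have hb : ((((PySem.Dict.mk p).get? "user_id").getD 0) == u) = false := by simp [h]
      simp only [pvAltLoop, List.map_cons, hb, Bool.false_eq_true, if_false]
      rw [PySem.List.index?_cons_of_ne _ h, ih]
      cases hidx : PySem.List.index? (rest.map (fun p => ((PySem.Dict.mk p).get? "user_id").getD 0)) u <;> simp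

-- ===== VERDICT (by name: the statement is the Claim_ definition above) =====
theorem next_player_id_py_spec : Claim_equal_next_player_id_py := by
  intro session user_id _ _
  simp only [Spec_next_player_id_py, next_player_id_py, next_player_id_py_alt]
  cases hp : ((PySem.Dict.mk session).get? "players").getD [] with
  | nil => simp
  | cons p0 rest =>
    simp only [pvAltLoop_false]
    generalize hids : ((p0 :: rest).map (fun p => ((PySem.Dict.mk p).get? "user_id").getD 0)) = ids
    have hids' : ids = ((PySem.Dict.mk p0).get? "user_id").getD 0 :: rest.map (fun p => ((PySem.Dict.mk p).get? "user_id").getD 0) := by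
      rw [← hids]; simp
    have hne : ids ≠ [] := by rw [hids']; simp
    have h0 : PySem.List.pyGetD ids 0 0 = ((PySem.Dict.mk p0).get? "user_id").getD 0 := by
      rw [hids', PySem.List.pyGetD_zero_cons]
    by_cases hmem : user_id ∈ ids
    · simp only [if_neg hne, List.contains_eq_mem, hmem, decide_true, not_true, if_false]
      obtain ⟨i, hi⟩ := Option.isSome_iff_exists.mp ((PySem.List.index?_isSome_iff ids user_id).mpr hmem)
      obtain ⟨hk, _, _⟩ := PySem.List.getElem_of_index?_eq_some hi
      rw [hi]
      simp only []
      have hnpos : (0 : Int) < (ids.length : Int) := by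
        have : 0 < ids.length := List.length_pos_of_ne_nil hne
        exact_mod_cast this
      by_cases hlast : i + 1 = ids.length
      · have hm : PySem.Int.mod ((i : Int) + 1) (ids.length : Int) = 0 := by
          rw [PySem.Int.mod_eq_emod_of_pos hnpos]
          have : ((i : Int) + 1) = (ids.length : Int) := by exact_mod_cast hlast
          rw [this]; simp
        rw [hm, h0]
        have : ids.drop (i + 1) = [] := by
          rw [List.drop_eq_nil_iff]; omega
        rw [this]; rfl
      · have hlt : i + 1 < ids.length := by omega
        have hm : PySem.Int.mod ((i : Int) + 1) (ids.length : Int) = ((i + 1 : Nat) : Int) := by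
          rw [PySem.Int.mod_eq_emod_of_pos hnpos]
          rw [Int.emod_eq_of_lt (by positivity) (by exact_mod_cast hlt)]
          push_cast; ring
        rw [hm, PySem.List.pyGetD_natCast]
        have hhd : (ids.drop (i + 1)).headD (((PySem.Dict.mk p0).get? "user_id").getD 0) = ids[i + 1] := by
          rw [List.headD_eq_head?_getD, List.head?_drop, List.getElem?_eq_getElem hlt]
          rfl
        rw [hhd, List.getD_eq_getElem _ _ hlt]
    · have hidx : PySem.List.index? ids user_id = none := (PySem.List.index?_eq_none_iff ids user_id).mpr hmem
      simp only [if_neg hne, List.contains_eq_mem, hmem, decide_false, Bool.false_eq_true,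
        not_false_iff, if_true, hidx, h0]
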